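-- pv_equiv track=rewrite | github.com/disrei/KBLens | src/kblens/packer.py | group_by_nearest_parent
-- ===== SOURCE A (Python) =====
-- def group_by_nearest_parent(dirs: list[str]) -> dict[str, list[str]]:
--     """Group directories by their nearest parent that is also in the set.
--
--     Example:
--         Input:  [core/session, core/session/routing, core/messages]
--         Output: {"core/session": [core/session, core/session/routing],
--                  "core/messages": [core/messages]}
--     """
--     dir_set = set(dirs)
--     groups: dict[str, list[str]] = {}
--
--     for d in sorted(dirs):
--         parent = d
--         assigned = False
--         while "/" in parent:
--             parent = parent.rsplit("/", 1)[0]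
--             if parent in dir_set:
--                 groups.setdefault(parent, [])
--                 if d not in groups[parent]:
--                     groups[parent].append(d)
--                 assigned = True
--                 break
--         if not assigned:
--             groups.setdefault(d, [])
--             if d not in groups[d]:
--                 groups[d].append(d)
--
--     # Ensure parent key is itself in its own list
--     for key in list(groups.keys()):
--         if key not in groups[key]:
--             groups[key].insert(0, key)
--
--     return groups
-- ===== SOURCE B (Python) =====
-- def group_by_nearest_parent(dirs: list[str]) -> dict[str, list[str]]:
--     """Group directories by their nearest parent that is also in the set.
--
--     Single forward pass: for each directory (in sorted order) scan its
--     characters once, remembering the deepest slash-prefix that is itself in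
--     the set; buckets are created already seeded with their key, so no
--     fix-up pass is needed.
--     """
--     dir_set = set(dirs)
--     groups: dict[str, list[str]] = {}
--     for d in sorted(dirs):
--         key = d
--         for i, ch in enumerate(d):
--             if ch == "/" and d[:i] in dir_set:
--                 key = d[:i]
--         bucket = groups.setdefault(key, [key])
--         if d not in bucket:
--             bucket.append(d)
--     return groups
-- ===== Notes on version B (the rewrite author's own statement) =====
-- stated objective: simpler
-- what changed: B finds each directory's nearest in-set parent by one forward scan over its characters (remembering the deepest slash-prefix in the set) instead of A's bottom-up rsplit while-loop, and seeds every bucket with its key at creation, which removes A's final fix-up pass over the dict.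
import Mathlib
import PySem

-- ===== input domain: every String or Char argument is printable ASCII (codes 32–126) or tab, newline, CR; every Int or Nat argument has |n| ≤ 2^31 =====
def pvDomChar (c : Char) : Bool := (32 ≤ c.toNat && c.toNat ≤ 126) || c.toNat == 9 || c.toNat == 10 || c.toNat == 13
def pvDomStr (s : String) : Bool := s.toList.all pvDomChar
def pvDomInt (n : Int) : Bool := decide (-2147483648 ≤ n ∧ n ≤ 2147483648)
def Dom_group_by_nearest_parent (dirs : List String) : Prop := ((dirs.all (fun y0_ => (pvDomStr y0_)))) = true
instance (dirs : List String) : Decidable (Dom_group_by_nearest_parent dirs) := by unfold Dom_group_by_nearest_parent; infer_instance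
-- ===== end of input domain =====

-- B replaces A's bottom-up rsplit loop by a single forward prefix scan and seeds each
-- bucket with its key, eliminating A's final fix-up pass (objective: simpler).

-- ===== PORT A =====

-- parent.rsplit("/", 1)[0] for a parent containing '/': everything before the LAST '/' (exact there; A only uses it under the '"/" in parent' guard)
def pvBeforeLastSlash : List Char → List Char
  | [] => []
  | c :: rest => if '/' ∈ rest then c :: pvBeforeLastSlash rest else []

-- termination helper for the while loop: the stripped parent is strictly shorter
theorem pvBeforeLastSlash_length_lt (cs : List Char) (h : cs ≠ []) :
    (pvBeforeLastSlash cs).length < cs.length := by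
  induction cs with
  | nil => exact absurd rfl h
  | cons c rest ih =>
    by_cases hm : '/' ∈ rest
    · have hr : rest ≠ [] := by rintro rfl; simp at hm
      simp only [pvBeforeLastSlash, if_pos hm, List.length_cons]
      exact Nat.succ_lt_succ (ih hr)
    · simp [pvBeforeLastSlash, hm]

-- the 'while "/" in parent' loop of A: returns the parent assigned (none = not assigned)
def pvAWhile (dset : List String) (parent : List Char) : Option (List Char) :=
  if h : PySem.Chars.isIn ['/'] parent = true then
    let p := pvBeforeLastSlash parent
    if PySem.Set.contains dset (String.ofList p) = true then some p
    else pvAWhile dset p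
  else none
termination_by parent.length
decreasing_by
  have hne : parent ≠ [] := by
    rintro rfl
    rw [PySem.Chars.isIn_iff_infix] at h
    simpa using h.sublist.length_le
  exact pvBeforeLastSlash_length_lt parent hne

def group_by_nearest_parent (dirs : List String) : List (String × List String) :=
  let dirSet : PySem.Set String := PySem.Set.ofList dirs
  let groups : PySem.Dict String (List String) :=
    (PySem.List.sorted dirs (fun x => x)).foldl (fun groups d =>
      match pvAWhile dirSet d.toList with
      | some p =>            -- assigned: break hit at this parent
          let parent := String.ofList p
          let groups := groups.setdefault parent []
          let l := groups.getD parent []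
          if d ∈ l then groups else groups.insert parent (l ++ [d])
      | none =>              -- not assigned
          let groups := groups.setdefault d []
          let l := groups.getD d []
          if d ∈ l then groups else groups.insert d (l ++ [d])) PySem.Dict.empty
  -- Ensure parent key is itself in its own list
  (groups.keys.foldl (fun groups key =>
      let l := groups.getD key []
      if key ∈ l then groups else groups.insert key (PySem.List.insert l 0 key)) groups).items

-- ===== PORT B =====

def group_by_nearest_parent_alt (dirs : List String) : List (String × List String) :=
  let dirSet : PySem.Set String := PySem.Set.ofList dirs
  ((PySem.List.sorted dirs (fun x => x)).foldl (fun (groups : PySem.Dict String (List String)) d =>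
      let key := (PySem.List.enumerate d.toList).foldl (fun key p =>
          if p.2 = '/' ∧ PySem.Set.contains dirSet (String.ofList (PySem.List.slice d.toList none (some p.1))) = true
          then String.ofList (PySem.List.slice d.toList none (some p.1)) else key) d
      let groups := groups.setdefault key [key]
      let bucket := groups.getD key []
      if d ∈ bucket then groups else groups.insert key (bucket ++ [d]))
    (PySem.Dict.empty : PySem.Dict String (List String))).items

-- ===== PRECONDITION & SPEC =====
def Spec_group_by_nearest_parent (dirs : List String) (out : List (String × List String)) : Prop := out = group_by_nearest_parent_alt dirs
instance (dirs : List String) (out : List (String × List String)) : Decidable (Spec_group_by_nearest_parent dirs out) := by unfold Spec_group_by_nearest_parent; infer_instance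

-- ===== CLAIM (what is proved, stated in full; the proofs are below) =====
def Claim_equal_group_by_nearest_parent : Prop := ∀ (dirs : List String), Dom_group_by_nearest_parent dirs → Spec_group_by_nearest_parent dirs (group_by_nearest_parent dirs)

-- ===== LEMMAS AND PROOFS =====

-- downward search for the deepest i < m with d[i] = '/' and d[:i] in the set
def pvDSearch (dset : List String) (cs : List Char) : Nat → Option Nat
  | 0 => none
  | m + 1 =>
    if cs[m]? = some '/' ∧ String.ofList (cs.take m) ∈ dset then some m
    else pvDSearch dset cs m

-- the common representative ("nearest in-set parent, else itself")
def pvRep (dset : List String) (d : String) : String :=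
  match pvDSearch dset d.toList d.toList.length with
  | some i => String.ofList (d.toList.take i)
  | none => d

theorem pvDSearch_some (dset : List String) (cs : List Char) (m i : Nat)
    (h : pvDSearch dset cs m = some i) :
    i < m ∧ cs[i]? = some '/' ∧ String.ofList (cs.take i) ∈ dset := by
  induction m with
  | zero => simp [pvDSearch] at h
  | succ m ih =>
    rw [pvDSearch] at h
    split at h
    · rename_i hc
      cases h
      exact ⟨Nat.lt_succ_self _, hc.1, hc.2⟩
    · have := ih h
      exact ⟨Nat.lt_succ_of_lt this.1, this.2⟩

-- the last '/' of cs: pvBeforeLastSlash is the prefix before it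
theorem pvBLS_spec (cs : List Char) (h : '/' ∈ cs) :
    ∃ j, j < cs.length ∧ cs[j]? = some '/' ∧ pvBeforeLastSlash cs = cs.take j ∧
      ∀ i, j < i → cs[i]? ≠ some '/' := by
  induction cs with
  | nil => simp at h
  | cons c rest ih =>
    by_cases hm : '/' ∈ rest
    · obtain ⟨j, hj, hsl, hbl, habove⟩ := ih hm
      refine ⟨j+1, by simpa using hj, by simpa using hsl, ?_, ?_⟩
      · simp [pvBeforeLastSlash, hm, hbl]
      · intro i hi
        cases i with
        | zero => omega
        | succ i => simpa using habove i (by omega)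
    · have hc : c = '/' := by
        rcases List.mem_cons.mp h with h' | h'
        · exact h'.symm
        · exact absurd h' hm
      refine ⟨0, by simp, by simp [hc], by simp [pvBeforeLastSlash, hm], ?_⟩
      intro i hi
      cases i with
      | zero => omega
      | succ i =>
        simp only [List.getElem?_cons_succ]
        intro hcon
        exact hm (List.mem_of_getElem? hcon)

theorem pvDSearch_skip (dset : List String) (cs : List Char) (j m : Nat) (hjm : j < m)
    (h : ∀ i, j < i → i < m → cs[i]? ≠ some '/') :
    pvDSearch dset cs m = pvDSearch dset cs (j+1) := by
  induction m with
  | zero => omega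
  | succ m ih =>
    rcases Nat.lt_or_ge j m with hm | hm
    · rw [pvDSearch, if_neg, ih hm (fun i h1 h2 => h i h1 (by omega))]
      intro hcon
      exact h m (by omega) (by omega) hcon.1
    · have : j = m := by omega
      subst this
      rfl

theorem pvDSearch_take (dset : List String) (cs : List Char) (j : Nat) :
    ∀ m, m ≤ j → pvDSearch dset cs m = pvDSearch dset (cs.take j) m := by
  intro m
  induction m with
  | zero => intro _; rfl
  | succ m ih =>
    intro hm
    have hmj : m < j := hm
    have h1 : (cs.take j)[m]? = cs[m]? := by
      rw [List.getElem?_take, if_pos hmj]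
    have h2 : (cs.take j).take m = cs.take m := by
      rw [List.take_take, Nat.min_eq_left (by omega)]
    rw [pvDSearch, pvDSearch, ih (by omega), h1, h2]

theorem pvDSearch_none_of_no_slash (dset : List String) (cs : List Char) (m : Nat)
    (h : ∀ i, i < m → cs[i]? ≠ some '/') :
    pvDSearch dset cs m = none := by
  induction m with
  | zero => rfl
  | succ m ih =>
    rw [pvDSearch, if_neg, ih (fun i hi => h i (by omega))]
    intro hc
    exact h m (by omega) hc.1

theorem pvAWhile_eq_dsearch (dset : List String) (cs : List Char) :
    pvAWhile dset cs = (pvDSearch dset cs cs.length).map (fun i => cs.take i) := by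
  by_cases hin : PySem.Chars.isIn ['/'] cs = true
  · have hmem : '/' ∈ cs := by
      rw [PySem.Chars.isIn_iff_infix] at hin
      exact hin.sublist.subset (by simp)
    obtain ⟨j, hj, hsl, hbl, habove⟩ := pvBLS_spec cs hmem
    rw [pvAWhile, dif_pos hin]
    rw [pvDSearch_skip dset cs j cs.length hj (fun i h1 _ => habove i h1)]
    rw [pvDSearch]
    by_cases hset : String.ofList (cs.take j) ∈ dset
    · rw [hbl, if_pos ((PySem.Set.contains_iff dset _).mpr hset), if_pos ⟨hsl, hset⟩]
      rfl
    · rw [hbl, if_neg (fun hc => hset ((PySem.Set.contains_iff dset _).mp hc)),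
          if_neg (fun hc => hset hc.2)]
      have ih := pvAWhile_eq_dsearch dset (cs.take j)
      have hlen : (cs.take j).length = j := by simp; omega
      rw [ih, hlen, ← pvDSearch_take dset cs j j (le_refl j)]
      cases hres : pvDSearch dset cs j with
      | none => rfl
      | some i =>
        have hij := (pvDSearch_some dset cs j i hres).1
        simp [List.take_take, Nat.min_eq_left (by omega : i ≤ j)]
  · rw [pvAWhile, dif_neg hin]
    rw [pvDSearch_none_of_no_slash]
    · rfl
    · intro i _ hcon
      apply hin
      rw [PySem.Chars.isIn_iff_infix]
      obtain ⟨s, t, rfl⟩ := List.append_of_mem (List.mem_of_getElem? hcon)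
      exact ⟨s, t, by simp⟩
termination_by cs.length
decreasing_by
  simp only [List.length_take]
  omega

theorem pvSetdefault_eq {κ ν : Type} [BEq κ] (g : PySem.Dict κ ν) (k : κ) (v : ν) :
    g.setdefault k v = if g.contains k = true then g else g.insert k v := by
  by_cases h : g.contains k = true <;> simp [PySem.Dict.setdefault, PySem.Dict.insert, h]

theorem pvBKeyFold (dset : List String) (cs : List Char) (k0 : String) (m : Nat) (hm : m ≤ cs.length) :
    (PySem.List.enumerate (cs.take m)).foldl (fun key p =>
        if p.2 = '/' ∧ PySem.Set.contains dset (String.ofList (PySem.List.slice cs none (some p.1))) = true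
        then String.ofList (PySem.List.slice cs none (some p.1)) else key) k0
      = match pvDSearch dset cs m with
        | some i => String.ofList (cs.take i)
        | none => k0 := by
  induction m with
  | zero => rfl
  | succ m ih =>
    have hmlt : m < cs.length := hm
    have htake : cs.take (m+1) = cs.take m ++ [cs[m]] := by
      rw [List.take_add_one, List.getElem?_eq_getElem hmlt]
      rfl
    have IH := ih (Nat.le_of_succ_le hm)
    rw [htake, PySem.List.enumerate_append, List.foldl_append, IH]
    have hen : PySem.List.enumerate [cs[m]] ((0 : Int) + ↑(cs.take m).length) = [((m : Int), cs[m])] := by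
      rw [PySem.List.enumerate_cons]
      simp only [PySem.List.enumerate_nil, List.length_take]
      norm_num
      omega
    rw [hen]
    simp only [List.foldl_cons, List.foldl_nil]
    have hslice : PySem.List.slice cs none (some ((m : Nat) : Int)) = cs.take m :=
      PySem.List.slice_to_natCast cs m
    by_cases hcond : cs[m] = '/' ∧ String.ofList (cs.take m) ∈ dset
    · rw [if_pos (by exact ⟨hcond.1, by rw [hslice]; exact (PySem.Set.contains_iff dset _).mpr hcond.2⟩)]
      rw [pvDSearch, if_pos ⟨by rw [List.getElem?_eq_getElem hmlt, hcond.1], hcond.2⟩, hslice]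
    · rw [if_neg (fun hc => hcond ⟨hc.1, by rw [hslice] at hc; exact (PySem.Set.contains_iff dset _).mp hc.2⟩)]
      rw [pvDSearch, if_neg (fun hc => hcond ⟨by rw [List.getElem?_eq_getElem hmlt] at hc; exact Option.some.inj hc.1, hc.2⟩)]

theorem pvBKey_eq_rep (dset : List String) (d : String) :
    (PySem.List.enumerate d.toList).foldl (fun key p =>
        if p.2 = '/' ∧ PySem.Set.contains dset (String.ofList (PySem.List.slice d.toList none (some p.1))) = true
        then String.ofList (PySem.List.slice d.toList none (some p.1)) else key) d
      = pvRep dset d := by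
  have h := pvBKeyFold dset d.toList d (d.toList.length) (le_refl _)
  rw [List.take_length] at h
  rw [h, pvRep]

-- the generic grouping step: bucket seeded with 'seed k'
def pvStep (rep : String → String) (seed : String → List String)
    (g : PySem.Dict String (List String)) (d : String) : PySem.Dict String (List String) :=
  let k := rep d
  let g := g.setdefault k (seed k)
  let l := g.getD k []
  if d ∈ l then g else g.insert k (l ++ [d])

theorem pvFold_closed (rep : String → String) (seed : String → List String) (P : List String) :
    (P.foldl (pvStep rep seed) PySem.Dict.empty).keys = PySem.List.dedup (P.map rep) ∧
    ∀ k, (P.foldl (pvStep rep seed) PySem.Dict.empty).get? k =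
      if k ∈ P.map rep
      then some (seed k ++ (PySem.List.dedup P).filter (fun x => decide (rep x = k ∧ x ∉ seed k)))
      else none := by
  induction P using List.reverseRecOn with
  | nil =>
    refine ⟨by simp [PySem.Dict.empty, PySem.Dict.keys, PySem.List.dedup, PySem.Set.ofList], ?_⟩
    intro k
    simp [PySem.Dict.empty, PySem.Dict.get?]
  | append_singleton P d ih =>
    obtain ⟨hkeys, hget⟩ := ih
    set g := P.foldl (pvStep rep seed) PySem.Dict.empty with hg
    set k0 := rep d with hk0def
    have hdd : PySem.List.dedup (P ++ [d]) = if d ∈ P then PySem.List.dedup P else PySem.List.dedup P ++ [d] := by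
      rw [PySem.List.dedup_eq_ofList, PySem.Set.ofList_append_singleton, PySem.Set.add_eq_ite]
      by_cases hdP : d ∈ P <;>
        simp [hdP, PySem.Set.mem_ofList, PySem.List.dedup_eq_ofList]
    have hmapdd : ∀ k : String, PySem.List.dedup (List.map rep P ++ [k]) =
        if k ∈ List.map rep P then PySem.List.dedup (List.map rep P) else PySem.List.dedup (List.map rep P) ++ [k] := by
      intro k
      rw [PySem.List.dedup_eq_ofList, PySem.Set.ofList_append_singleton, PySem.Set.add_eq_ite]
      by_cases hkP : k ∈ List.map rep P <;>
        simp [hkP, PySem.Set.mem_ofList, PySem.List.dedup_eq_ofList]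
    have hstep : (P ++ [d]).foldl (pvStep rep seed) PySem.Dict.empty = pvStep rep seed g d := by
      rw [List.foldl_append, List.foldl_cons, List.foldl_nil]
    rw [hstep, List.map_append, List.map_cons, List.map_nil]
    by_cases hk0 : k0 ∈ List.map rep P
    · -- key already present
      have hcont : g.contains k0 = true :=
        (PySem.Dict.contains_iff_mem_keys g k0).mpr (by rw [hkeys]; exact (PySem.List.mem_dedup _ _).mpr hk0)
      have hbucket : g.get? k0 = some (seed k0 ++ (PySem.List.dedup P).filter (fun x => decide (rep x = k0 ∧ x ∉ seed k0))) := by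
        rw [hget k0, if_pos hk0]
      have hsd : g.setdefault k0 (seed k0) = g := by
        rw [pvSetdefault_eq, if_pos hcont]
      have hgetD : g.getD k0 [] = seed k0 ++ (PySem.List.dedup P).filter (fun x => decide (rep x = k0 ∧ x ∉ seed k0)) := by
        rw [PySem.Dict.getD_eq_get?_getD, hbucket]; rfl
      simp only [pvStep, ← hk0def, hsd, hgetD]
      by_cases hdl : d ∈ seed k0 ++ (PySem.List.dedup P).filter (fun x => decide (rep x = k0 ∧ x ∉ seed k0))
      · rw [if_pos hdl]
        have hdmem : d ∈ seed k0 ∨ d ∈ P := by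
          rcases List.mem_append.mp hdl with h | h
          · exact Or.inl h
          · exact Or.inr ((PySem.List.mem_dedup _ _).mp (List.mem_filter.mp h).1)
        refine ⟨by rw [hkeys, hmapdd k0, if_pos hk0], ?_⟩
        intro k
        rw [hget k]
        by_cases hkk : k ∈ List.map rep P ++ [k0]
        · rcases List.mem_append.mp hkk with hkP | hkone
          · rw [if_pos hkP, if_pos hkk]
            congr 2
            rw [hdd]
            by_cases hdP : d ∈ P
            · rw [if_pos hdP]
            · rw [if_neg hdP, List.filter_append]
              have hds : d ∈ seed k0 := by
                rcases hdmem with h | h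
                · exact h
                · exact absurd h hdP
              have hnod : ¬(rep d = k ∧ d ∉ seed k) := by
                rintro ⟨h1, h2⟩
                exact h2 (by rw [← h1, ← hk0def]; exact hds)
              simp [hnod]
          · have hkk0 : k = k0 := by simpa using hkone
            subst hkk0
            rw [if_pos hk0, if_pos hkk]
            congr 2
            rw [hdd]
            by_cases hdP : d ∈ P
            · rw [if_pos hdP]
            · rw [if_neg hdP, List.filter_append]
              have hds : d ∈ seed k0 := by
                rcases hdmem with h | h
                · exact h
                · exact absurd h hdP
              simp only [List.filter_cons, List.filter_nil]
              have : ¬(rep d = k0 ∧ d ∉ seed k0) := fun hc => hc.2 hds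
              simp [this]
        · have hkP : k ∉ List.map rep P := fun h => hkk (List.mem_append.mpr (Or.inl h))
          rw [if_neg hkP, if_neg hkk]
      · rw [if_neg hdl]
        have hdseed : d ∉ seed k0 := fun h => hdl (List.mem_append.mpr (Or.inl h))
        have hdP : d ∉ P := by
          intro h
          apply hdl
          refine List.mem_append.mpr (Or.inr (List.mem_filter.mpr ⟨(PySem.List.mem_dedup _ _).mpr h, ?_⟩))
          simp [hdseed, ← hk0def]
        refine ⟨?_, ?_⟩
        · rw [PySem.Dict.keys_insert_of_contains g (seed k0 ++ _ ++ [d]) hcont, hkeys, hmapdd k0, if_pos hk0]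
        · intro k
          by_cases hkk0 : k = k0
          · subst hkk0
            rw [PySem.Dict.get?_insert, if_pos rfl, if_pos (List.mem_append.mpr (Or.inr (by simp)))]
            rw [hdd, if_neg hdP, List.filter_append]
            simp [hdseed, ← hk0def, List.append_assoc]
          · rw [PySem.Dict.get?_insert, if_neg hkk0, hget k]
            have hmemiff : (k ∈ List.map rep P ++ [k0]) ↔ k ∈ List.map rep P := by
              simp [hkk0]
            by_cases hkP : k ∈ List.map rep P
            · rw [if_pos hkP, if_pos (hmemiff.mpr hkP)]
              congr 2
              rw [hdd, if_neg hdP, List.filter_append]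
              have : rep d ≠ k := fun h => hkk0 (by rw [hk0def, ← h])
              simp [this]
            · rw [if_neg hkP, if_neg (fun h => hkP (hmemiff.mp h))]
    · -- key absent
      have hcont : g.contains k0 = false := by
        by_contra hb
        have : g.contains k0 = true := by simpa using hb
        exact hk0 ((PySem.List.mem_dedup _ _).mp (hkeys ▸ (PySem.Dict.contains_iff_mem_keys g k0).mp this))
      have hfilnil : (PySem.List.dedup P).filter (fun x => decide (rep x = k0 ∧ x ∉ seed k0)) = [] := by
        rw [List.filter_eq_nil_iff]
        intro x hx
        simp only [decide_eq_true_eq, not_and]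
        intro hrx
        exact absurd (hrx ▸ List.mem_map_of_mem ((PySem.List.mem_dedup _ _).mp hx)) hk0
      have hdP : d ∉ P := fun h => hk0 (List.mem_map_of_mem h)
      have hsd : g.setdefault k0 (seed k0) = g.insert k0 (seed k0) := by
        rw [pvSetdefault_eq, hcont]
        simp
      have hgetD : (g.insert k0 (seed k0)).getD k0 [] = seed k0 :=
        PySem.Dict.getD_insert_self g k0 (seed k0) []
      have hkeys1 : (g.insert k0 (seed k0)).keys = g.keys ++ [k0] :=
        PySem.Dict.keys_insert_of_not_contains g (seed k0) (by simp [hcont])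
      simp only [pvStep, ← hk0def, hsd, hgetD]
      have hkeysgoal : PySem.List.dedup (List.map rep P ++ [k0]) = g.keys ++ [k0] := by
        rw [hmapdd k0, if_neg hk0, hkeys]
      have hgetnew : ∀ k, k ≠ k0 → (g.insert k0 (seed k0)).get? k = g.get? k := by
        intro k hk
        rw [PySem.Dict.get?_insert, if_neg hk]
      by_cases hdl : d ∈ seed k0
      · rw [if_pos hdl]
        refine ⟨by rw [hkeys1, hkeysgoal], ?_⟩
        intro k
        by_cases hkk0 : k = k0
        · subst hkk0
          rw [PySem.Dict.get?_insert, if_pos rfl, if_pos (List.mem_append.mpr (Or.inr (by simp)))]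
          rw [hdd, if_neg hdP, List.filter_append, hfilnil]
          simp [hdl]
        · rw [hgetnew k hkk0, hget k]
          have hmemiff : (k ∈ List.map rep P ++ [k0]) ↔ k ∈ List.map rep P := by simp [hkk0]
          by_cases hkP : k ∈ List.map rep P
          · rw [if_pos hkP, if_pos (hmemiff.mpr hkP)]
            congr 2
            rw [hdd, if_neg hdP, List.filter_append]
            have : rep d ≠ k := fun h => hkk0 (by rw [hk0def, ← h])
            simp [this]
          · rw [if_neg hkP, if_neg (fun h => hkP (hmemiff.mp h))]
      · rw [if_neg hdl]
        have hcont1 : (g.insert k0 (seed k0)).contains k0 = true := by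
          rw [PySem.Dict.contains_iff_mem_keys, hkeys1]
          simp
        refine ⟨?_, ?_⟩
        · rw [PySem.Dict.keys_insert_of_contains _ (seed k0 ++ [d]) hcont1, hkeys1, hkeysgoal]
        · intro k
          by_cases hkk0 : k = k0
          · subst hkk0
            rw [PySem.Dict.get?_insert, if_pos rfl, if_pos (List.mem_append.mpr (Or.inr (by simp)))]
            rw [hdd, if_neg hdP, List.filter_append, hfilnil]
            simp only [List.filter_cons, List.filter_nil]
            have : rep d = k0 ∧ d ∉ seed k0 := ⟨hk0def.symm, hdl⟩
            simp [this.1, this.2]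
          · rw [PySem.Dict.get?_insert, if_neg hkk0, hgetnew k hkk0, hget k]
            have hmemiff : (k ∈ List.map rep P ++ [k0]) ↔ k ∈ List.map rep P := by simp [hkk0]
            by_cases hkP : k ∈ List.map rep P
            · rw [if_pos hkP, if_pos (hmemiff.mpr hkP)]
              congr 2
              rw [hdd, if_neg hdP, List.filter_append]
              have : rep d ≠ k := fun h => hkk0 (by rw [hk0def, ← h])
              simp [this]
            · rw [if_neg hkP, if_neg (fun h => hkP (hmemiff.mp h))]

theorem pvFix_fold (ks : List String) (g : PySem.Dict String (List String))
    (hnd : ks.Nodup) (hsub : ∀ k ∈ ks, k ∈ g.keys) :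
    (ks.foldl (fun g key =>
        let l := g.getD key []
        if key ∈ l then g else g.insert key (PySem.List.insert l 0 key)) g).keys = g.keys ∧
    ∀ k, (ks.foldl (fun g key =>
        let l := g.getD key []
        if key ∈ l then g else g.insert key (PySem.List.insert l 0 key)) g).get? k =
      if k ∈ ks then (g.get? k).map (fun l => if k ∈ l then l else k :: l) else g.get? k := by
  induction ks generalizing g with
  | nil => exact ⟨rfl, fun k => by simp⟩
  | cons k0 rest ih =>
    have hk0g : k0 ∈ g.keys := hsub k0 (by simp)
    obtain ⟨hk0nr, hndr⟩ := List.nodup_cons.mp hnd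
    obtain ⟨v, hv⟩ : ∃ v, g.get? k0 = some v := by
      cases hgv : g.get? k0 with
      | none => exact absurd ((PySem.Dict.get?_eq_none_iff_not_mem_keys g k0).mp hgv) (by simpa using hk0g)
      | some v => exact ⟨v, rfl⟩
    have hgetD : g.getD k0 [] = v := by rw [PySem.Dict.getD_eq_get?_getD, hv]; rfl
    have hcont : g.contains k0 = true := (PySem.Dict.contains_iff_mem_keys g k0).mpr hk0g
    rw [List.foldl_cons]
    have hstep : (let l := g.getD k0 []
        if k0 ∈ l then g else g.insert k0 (PySem.List.insert l 0 k0))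
        = if k0 ∈ v then g else g.insert k0 (k0 :: v) := by
      simp only [hgetD, PySem.List.insert_zero]
    rw [hstep]
    by_cases hkv : k0 ∈ v
    · rw [if_pos hkv]
      obtain ⟨ihk, ihg⟩ := ih g hndr (fun k hk => hsub k (by simp [hk]))
      refine ⟨ihk, ?_⟩
      intro k
      rw [ihg k]
      by_cases hkr : k ∈ rest
      · rw [if_pos hkr, if_pos (by simp [hkr])]
      · rw [if_neg hkr]
        by_cases hkk0 : k = k0
        · subst hkk0
          rw [if_pos (by simp), hv]
          simp [hkv]
        · rw [if_neg (by simp [hkk0, hkr])]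
    · rw [if_neg hkv]
      set g1 := g.insert k0 (k0 :: v) with hg1
      have hkeys1 : g1.keys = g.keys := PySem.Dict.keys_insert_of_contains g (k0 :: v) hcont
      have hget1self : g1.get? k0 = some (k0 :: v) := by
        rw [hg1, PySem.Dict.get?_insert, if_pos rfl]
      have hget1other : ∀ k, k ≠ k0 → g1.get? k = g.get? k := by
        intro k hk
        rw [hg1, PySem.Dict.get?_insert, if_neg hk]
      obtain ⟨ihk, ihg⟩ := ih g1 hndr (fun k hk => hkeys1 ▸ hsub k (by simp [hk]))
      refine ⟨ihk.trans hkeys1, ?_⟩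
      intro k
      rw [ihg k]
      by_cases hkr : k ∈ rest
      · rw [if_pos hkr, if_pos (by simp [hkr]), hget1other k (fun h => hk0nr (h ▸ hkr))]
      · rw [if_neg hkr]
        by_cases hkk0 : k = k0
        · subst hkk0
          rw [if_pos (by simp), hget1self, hv]
          simp [hkv]
        · rw [if_neg (by simp [hkk0, hkr]), hget1other k hkk0]

theorem pvItems_ext_aux (l1 l2 : List (String × List String))
    (hk : l1.map Prod.fst = l2.map Prod.fst) (hn : (l1.map Prod.fst).Nodup)
    (h : ∀ k, (PySem.Dict.mk l1).get? k = (PySem.Dict.mk l2).get? k) : l1 = l2 := by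
  induction l1 generalizing l2 with
  | nil =>
    cases l2 with
    | nil => rfl
    | cons q t2 => simp at hk
  | cons p t1 ih =>
    cases l2 with
    | nil => simp at hk
    | cons q t2 =>
      obtain ⟨k, v1⟩ := p
      obtain ⟨k2, v2⟩ := q
      simp only [List.map_cons, List.cons.injEq] at hk
      obtain ⟨hk2, htk⟩ := hk
      subst hk2
      have hv := h k
      simp only [PySem.Dict.get?_mk_cons, beq_self_eq_true, if_pos, Option.some.injEq] at hv
      subst hv
      have hkt1 : k ∉ t1.map Prod.fst := (List.nodup_cons.mp hn).1
      have hkt2 : k ∉ t2.map Prod.fst := htk ▸ hkt1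
      have htail : ∀ x, (PySem.Dict.mk t1).get? x = (PySem.Dict.mk t2).get? x := by
        intro x
        by_cases hx : x = k
        · subst hx
          rw [(PySem.Dict.get?_eq_none_iff_not_mem_keys _ _).mpr (by simpa [PySem.Dict.keys_mk] using hkt1),
              (PySem.Dict.get?_eq_none_iff_not_mem_keys _ _).mpr (by simpa [PySem.Dict.keys_mk] using hkt2)]
        · have := h x
          simp only [PySem.Dict.get?_mk_cons] at this
          rwa [if_neg (by simpa using Ne.symm hx), if_neg (by simpa using Ne.symm hx)] at this
      rw [ih t2 htk (List.nodup_cons.mp hn).2 htail]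

theorem pvItems_ext (d1 d2 : PySem.Dict String (List String))
    (hk : d1.keys = d2.keys) (hn : d1.keys.Nodup)
    (h : ∀ k, d1.get? k = d2.get? k) : d1.items = d2.items := by
  obtain ⟨l1⟩ := d1
  obtain ⟨l2⟩ := d2
  simp only [PySem.Dict.keys_mk] at hk hn
  exact pvItems_ext_aux l1 l2 hk hn h

theorem pvTake_lt (cs : List Char) (i : Nat) (h : i < cs.length) : cs.take i < cs := by
  induction cs generalizing i with
  | nil => simp at h
  | cons c t ih =>
    cases i with
    | zero => exact List.nil_lt_cons c t
    | succ i =>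
      show (c :: t.take i) < c :: t
      exact (List.cons_lt_cons_self (a := c)).mpr (ih i (by simpa using h))

theorem pvRep_lt (dset : List String) (x k : String) (h : pvRep dset x = k) (hne : x ≠ k) :
    k < x := by
  unfold pvRep at h
  cases hd : pvDSearch dset x.toList x.toList.length with
  | none => rw [hd] at h; simp only at h; exact absurd h hne
  | some i =>
    rw [hd] at h
    have hi := (pvDSearch_some dset x.toList _ i hd).1
    rw [String.lt_iff_toList_lt, ← h]
    simpa using pvTake_lt x.toList i hi

theorem pvFilter_sorted_head (l : List String) (p : String → Bool) (k : String)
    (hs : l.Pairwise (· < ·)) (hk : k ∈ l) (hp : p k = true)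
    (hgt : ∀ x ∈ l, p x = true → x ≠ k → k < x) :
    l.filter p = k :: l.filter (fun x => p x && x ≠ k) := by
  induction l with
  | nil => simp at hk
  | cons y t ih =>
    rcases List.mem_cons.mp hk with rfl | hkt
    · -- head is k
      have htail : ∀ x ∈ t, p x = true → x ≠ k → (x ≠ k) = true := by
        intro x _ _ hxk; simpa using hxk
      simp only [List.filter_cons, hp, if_pos]
      have : t.filter p = t.filter (fun x => p x && x ≠ k) := by
        apply List.filter_congr
        intro x hx
        have hxk : x ≠ k := by
          rintro rfl
          exact absurd ((List.pairwise_cons.mp hs).1 x hx) (lt_irrefl x)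
        simp [hxk]
      simp [this]
    · -- head y ≠ k
      have hyk : y ≠ k := by
        rintro rfl
        exact absurd ((List.pairwise_cons.mp hs).1 _ hkt) (lt_irrefl y)
      have hpy : p y = false := by
        by_contra hb
        have hpy : p y = true := by simpa using hb
        have h1 : k < y := hgt y (List.mem_cons_self) hpy hyk
        have h2 : y < k := (List.pairwise_cons.mp hs).1 k hkt
        exact absurd (h1.trans h2) (lt_irrefl k)
      rw [List.filter_cons_of_neg (by simp [hpy]), List.filter_cons_of_neg (by simp [hpy])]
      exact ih hs.tail hkt (fun x hx => hgt x (List.mem_cons_of_mem y hx))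

theorem pvDedup_sublist {α : Type} [BEq α] [LawfulBEq α] (xs : List α) :
    (PySem.List.dedup xs).Sublist xs := by
  induction xs with
  | nil => simp [PySem.List.dedup, PySem.Set.ofList]
  | cons x xs ih =>
    rw [PySem.List.dedup_eq_ofList] at ih ⊢
    rw [PySem.Set.ofList_cons]
    exact List.Sublist.cons₂ x ((List.filter_sublist).trans ih)

theorem pvPairwise_lt (l : List String) (h1 : l.Pairwise (· ≤ ·)) (h2 : l.Nodup) :
    l.Pairwise (· < ·) := by
  induction l with
  | nil => exact List.Pairwise.nil
  | cons x t ih =>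
    rw [List.pairwise_cons] at h1 ⊢
    rw [List.nodup_cons] at h2
    exact ⟨fun y hy => lt_of_le_of_ne (h1.1 y hy) (fun he => h2.1 (he ▸ hy)),
           ih h1.2 h2.2⟩

-- ===== VERDICT (by name: the statement is the Claim_ definition above) =====
theorem group_by_nearest_parent_spec : Claim_equal_group_by_nearest_parent := by
  intro dirs _
  unfold Spec_group_by_nearest_parent
  simp only [group_by_nearest_parent, group_by_nearest_parent_alt]
  set dset := PySem.Set.ofList dirs with hdset
  set L := PySem.List.sorted dirs (fun x => x) with hLdef
  set rep := pvRep dset with hrepdef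
  -- A's loop body is the generic step with empty seed
  have eA : (fun (groups : PySem.Dict String (List String)) (d : String) =>
      match pvAWhile dset d.toList with
      | some p =>
          let parent := String.ofList p
          let groups := groups.setdefault parent []
          let l := groups.getD parent []
          if d ∈ l then groups else groups.insert parent (l ++ [d])
      | none =>
          let groups := groups.setdefault d []
          let l := groups.getD d []
          if d ∈ l then groups else groups.insert d (l ++ [d]))
      = pvStep rep (fun _ => []) := by
    funext g d
    have h := pvAWhile_eq_dsearch dset d.toList
    cases hds : pvDSearch dset d.toList d.toList.length with
    | none =>
      rw [hds] at h
      simp only [Option.map_none] at h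
      have hrep : rep d = d := by rw [hrepdef, pvRep, hds]
      simp only [h, pvStep, hrep]
    | some i =>
      rw [hds] at h
      simp only [Option.map_some] at h
      have hrep : rep d = String.ofList (d.toList.take i) := by rw [hrepdef, pvRep, hds]
      simp only [h, pvStep, hrep]
  -- B's loop body is the generic step with singleton seed
  have eB : (fun (groups : PySem.Dict String (List String)) (d : String) =>
      let key := (PySem.List.enumerate d.toList).foldl (fun key p =>
          if p.2 = '/' ∧ PySem.Set.contains dset (String.ofList (PySem.List.slice d.toList none (some p.1))) = true
          then String.ofList (PySem.List.slice d.toList none (some p.1)) else key) d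
      let groups := groups.setdefault key [key]
      let bucket := groups.getD key []
      if d ∈ bucket then groups else groups.insert key (bucket ++ [d]))
      = pvStep rep (fun k => [k]) := by
    funext g d
    have h := pvBKey_eq_rep dset d
    simp only [h, pvStep, hrepdef]
  rw [eA, eB]
  -- closed forms of the two folds
  obtain ⟨hkA, hgA⟩ := pvFold_closed rep (fun _ => []) L
  obtain ⟨hkB, hgB⟩ := pvFold_closed rep (fun k => [k]) L
  set gA := L.foldl (pvStep rep (fun _ => [])) PySem.Dict.empty with hgAdef
  set gB := L.foldl (pvStep rep (fun k => [k])) PySem.Dict.empty with hgBdef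
  have hndA : gA.keys.Nodup := by
    rw [hkA, PySem.List.dedup_eq_ofList]
    exact PySem.Set.nodup_ofList _
  obtain ⟨hkF, hgF⟩ := pvFix_fold gA.keys gA hndA (fun k hk => hk)
  -- the ordering facts
  have hplt : (PySem.List.dedup L).Pairwise (· < ·) := by
    refine pvPairwise_lt _ ?_ (PySem.List.nodup_dedup L)
    exact List.Pairwise.sublist (pvDedup_sublist L) (PySem.List.sorted_pairwise dirs (fun x => x))
  -- compare the two dictionaries
  apply pvItems_ext
  · rw [hkF, hkA, hkB]
  · rw [hkF, hkA]
    rw [PySem.List.dedup_eq_ofList]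
    exact PySem.Set.nodup_ofList _
  · intro k
    rw [hgF k, hgB k]
    by_cases hk : k ∈ L.map rep
    · have hkk : k ∈ gA.keys := by
        rw [hkA]
        exact (PySem.List.mem_dedup _ _).mpr hk
      rw [if_pos hkk, hgA k, if_pos hk, if_pos hk]
      simp only [Option.map_some, Option.some.injEq, List.nil_append]
      set lA := (PySem.List.dedup L).filter (fun x => decide (rep x = k ∧ x ∉ ([] : List String))) with hlA
      by_cases hkla : k ∈ lA
      · rw [if_pos hkla]
        have hkmem : k ∈ PySem.List.dedup L := (List.mem_filter.mp hkla).1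
        have hrepk : rep k = k := by
          have := (List.mem_filter.mp hkla).2
          simp only [decide_eq_true_eq] at this
          exact this.1
        have hhead := pvFilter_sorted_head (PySem.List.dedup L)
          (fun x => decide (rep x = k ∧ x ∉ ([] : List String))) k hplt hkmem
          (by simp [hrepk])
          (fun x _ hpx hxk => pvRep_lt dset x k (by simpa using (of_decide_eq_true hpx).1) hxk)
        rw [hlA, hhead, List.singleton_append, List.cons_inj_right]
        apply List.filter_congr
        intro x _
        by_cases h1 : rep x = k <;> by_cases h2 : x = k <;> simp [h1, h2]
      · rw [if_neg hkla, List.singleton_append, List.cons_inj_right, hlA]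
        apply List.filter_congr
        intro x hx
        by_cases h1 : rep x = k
        · have hxk : x ≠ k := by
            rintro rfl
            exact hkla (List.mem_filter.mpr ⟨hx, by simp [h1]⟩)
          simp [h1, hxk]
        · simp [h1]
    · have hkk : k ∉ gA.keys := by
        rw [hkA]
        exact fun h => hk ((PySem.List.mem_dedup _ _).mp h)
      rw [if_neg hkk, hgA k, if_neg hk, if_neg hk]
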